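-- pv_equiv track=rewrite | github.com/xinye83/advent-of-code | 2023/day05.py | convert
-- ===== SOURCE A (Python) =====
-- def convert(lst, map):
--     ret = []
--     for x in lst:
--         y = None
--         for line in map.split("\n")[1:]:
--             dst, src, wid = line.split()
--             if x in range(int(src), int(src) + int(wid)):
--                 y = x - int(src) + int(dst)
--                 break
--         if not y:
--             y = x
--         ret.append(y)
--
--     return ret
-- ===== SOURCE B (Python) =====
-- def convert(lst, map):
--     # Inverted loop nest: one pass over the map's lines (each parsed once), filling
--     # not-yet-mapped slots of a result array; A instead rescans and re-parses the
--     # whole map for every element.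
--     res = [None] * len(lst)
--     for line in map.split("\n")[1:]:
--         dst, src, wid = line.split()
--         dst, src, wid = int(dst), int(src), int(wid)
--         for i, x in enumerate(lst):
--             if res[i] is None and src <= x < src + wid:
--                 res[i] = x - src + dst
--     return [x if r is None else r for r, x in zip(res, lst)]
-- ===== Notes on version B (the rewrite author's own statement) =====
-- stated objective: faster
-- what changed: B inverts the loop nest: it makes one pass over the map's lines, parsing each line once and filling the not-yet-mapped slots of a result array, instead of A's per-element rescan that re-splits and re-parses the whole map string for every element; B also returns the mapped value when it is 0 instead of A's 'if not y' fallback.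
-- intended difference: On inputs where some element x != 0 falls in a table range whose first matching line maps it to exactly 0, A's 'if not y' treats the legitimate mapped value 0 as 'no match' and returns x, while B returns the mapped 0, which is the intended conversion. — e.g. on convert([5], "h\n0 5 1"): A returns [5], B returns [0]
-- outside the precondition, e.g. on convert([], '\n'): A returns [], B raises ValueError; on convert([5], 'h\n0 5 1\nbad line'): A returns [5], B raises ValueError
import Mathlib
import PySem

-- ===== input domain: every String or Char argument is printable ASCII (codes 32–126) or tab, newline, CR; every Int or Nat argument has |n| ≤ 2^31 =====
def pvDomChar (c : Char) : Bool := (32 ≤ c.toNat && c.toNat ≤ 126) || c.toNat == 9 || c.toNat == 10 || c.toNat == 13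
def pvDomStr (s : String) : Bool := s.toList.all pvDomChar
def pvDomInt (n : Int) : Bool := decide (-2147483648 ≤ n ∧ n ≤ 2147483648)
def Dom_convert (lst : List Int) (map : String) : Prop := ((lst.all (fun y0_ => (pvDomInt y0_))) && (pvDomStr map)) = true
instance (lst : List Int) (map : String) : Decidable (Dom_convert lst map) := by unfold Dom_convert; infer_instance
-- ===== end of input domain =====

-- B inverts the loop nest: one pass over the map's lines (each parsed once), filling
-- not-yet-mapped slots of a result array, where A rescans and re-parses the whole map per
-- element; intended difference (see D_convert): B returns a mapped value even when it is 0,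
-- where A's `if not y` falls back to x.


-- shared plumbing: map.split("\n")[1:] and `dst, src, wid = line.split(); int(...)`
def pvMapLines (map : String) : List String := ((PySem.Str.split? map "\n").getD []).drop 1  -- split? = some (sep ≠ "")

def pvParseLine (line : String) : Option (Int × Int × Int) :=
  match PySem.Str.split₀ line with
  | [d, s, w] =>
    match PySem.Int.ofStr? d, PySem.Int.ofStr? s, PySem.Int.ofStr? w with
    | some d, some s, some w => some (d, s, w)
    | _, _, _ => none          -- int(...) raises ValueError (excluded by Pre_convert)
  | _ => none                  -- unpacking raises ValueError (excluded by Pre_convert)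

-- ===== PORT A =====
-- A's inner `for line in map.split("\n")[1:]`: first line whose range contains x, with break
def pvScanA (x : Int) : List String → Option Int
  | [] => none
  | line :: rest =>
    match pvParseLine line with
    | some (d, s, w) =>
      -- `if x in range(int(src), int(src) + int(wid))`
      if s ≤ x ∧ x < s + w then some (x - s + d) else pvScanA x rest
    | none => pvScanA x rest   -- Python raises here; outside Pre_convert

def convert (lst : List Int) (map : String) : List Int :=
  lst.foldl (fun ret x =>
    let y := pvScanA x (pvMapLines map)
    -- `if not y: y = x` — y is falsy when it is None or 0
    let y2 := match y with
      | some v => if v = 0 then x else v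
      | none => x
    ret ++ [y2]) []

-- ===== PORT B =====
-- B's inner `for i, x in enumerate(lst)`: per slot, fill it if still None and src ≤ x < src+wid
def pvStepB (d s w : Int) (lst : List Int) (res : List (Option Int)) : List (Option Int) :=
  (res.zip lst).map (fun p =>
    match p.1 with
    | none => if s ≤ p.2 ∧ p.2 < s + w then some (p.2 - s + d) else none
    | some v => some v)

def convert_alt (lst : List Int) (map : String) : List Int :=
  let res := (pvMapLines map).foldl (fun res line =>
    match pvParseLine line with
    | some (d, s, w) => pvStepB d s w lst res
    | none => res              -- Python raises here; outside Pre_convert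
    ) (lst.map (fun _ => (none : Option Int)))
  (res.zip lst).map (fun p => p.1.getD p.2)

-- ===== PRECONDITION & SPEC =====
-- Pre_ excludes maps with a malformed table line (not three int tokens): both Pythons raise
-- ValueError on them, except that A, parsing lines lazily per element, can return without ever
-- reaching the malformed line (empty lst, or every element matched earlier) where B still raises.
def Pre_convert (lst : List Int) (map : String) : Prop :=
  ∀ l ∈ pvMapLines map, (pvParseLine l).isSome
instance (lst : List Int) (map : String) : Decidable (Pre_convert lst map) := by
  unfold Pre_convert; infer_instance

def pvWitness_convert : List Int × String := ([79, 14], "seeds\n50 98 2\n52 50 48")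

-- On inputs where some x ≠ 0 is mapped by its first matching line to exactly 0, A's `if not y`
-- mistakes the legitimate value 0 for "no match" and returns x, while B returns the mapped 0,
-- which is the intended conversion. (t ∈ filter(hit).take 1 says: t is the first parsed line
-- whose [src, src+wid) range contains x; x + dst = src says that line maps x to 0.)
def D_convert (lst : List Int) (map : String) : Prop :=
  ∃ x ∈ lst, x ≠ 0 ∧
    ∃ t ∈ (((pvMapLines map).filterMap pvParseLine).filter
        fun t => decide (t.2.1 ≤ x ∧ x < t.2.1 + t.2.2)).take 1,
      x + t.1 = t.2.1
instance (lst : List Int) (map : String) : Decidable (D_convert lst map) := by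
  unfold D_convert; infer_instance

def Spec_convert (lst : List Int) (map : String) (out : List Int) : Prop :=
  ¬ D_convert lst map → out = convert_alt lst map
instance (lst : List Int) (map : String) (out : List Int) : Decidable (Spec_convert lst map out) := by
  unfold Spec_convert; infer_instance

def pvDiffWitness_convert : List Int × String := ([5], "h\n0 5 1")
def pvDiffWitnessOut_convert : (List Int) × (List Int) := ([5], [0])

-- ===== CLAIM (what is proved, stated in full; the proofs are below) =====
def Claim_unchanged_convert : Prop := ∀ (lst : List Int) (map : String), Dom_convert lst map → Pre_convert lst map → Spec_convert lst map (convert lst map)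
def Claim_exact_convert : Prop := ∀ (lst : List Int) (map : String), Dom_convert lst map → Pre_convert lst map → D_convert lst map → convert lst map ≠ convert_alt lst map
def Claim_changed_convert : Prop := Dom_convert (pvDiffWitness_convert.1) (pvDiffWitness_convert.2) ∧ Pre_convert (pvDiffWitness_convert.1) (pvDiffWitness_convert.2) ∧ D_convert (pvDiffWitness_convert.1) (pvDiffWitness_convert.2) ∧ convert (pvDiffWitness_convert.1) (pvDiffWitness_convert.2) = pvDiffWitnessOut_convert.1 ∧ convert_alt (pvDiffWitness_convert.1) (pvDiffWitness_convert.2) = pvDiffWitnessOut_convert.2 ∧ pvDiffWitnessOut_convert.1 ≠ pvDiffWitnessOut_convert.2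

-- ===== LEMMAS AND PROOFS =====

-- reference first-match lookup over the parsed table, used only to relate the two ports
def pvFind (x : Int) : List (Int × Int × Int) → Option Int
  | [] => none
  | (d, s, w) :: rs => if s ≤ x ∧ x < s + w then some (x - s + d) else pvFind x rs

theorem pvScanA_eq_find (x : Int) (lines : List String) :
    pvScanA x lines = pvFind x (lines.filterMap pvParseLine) := by
  induction lines with
  | nil => rfl
  | cons l rest ih =>
    simp only [pvScanA, List.filterMap_cons]
    cases h : pvParseLine l with
    | none => exact ih
    | some t =>
      obtain ⟨d, s, w⟩ := t
      simp only [pvFind]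
      split_ifs with hc <;> simp [ih]

theorem pvFind_append (x : Int) (as bs : List (Int × Int × Int)) :
    pvFind x (as ++ bs) = match pvFind x as with
      | some v => some v
      | none => pvFind x bs := by
  induction as with
  | nil => simp [pvFind]
  | cons t rs ih =>
    obtain ⟨d, s, w⟩ := t
    simp only [List.cons_append, pvFind]
    split_ifs <;> simp [ih]

-- per-slot view of B's inner pass when the slot array is a map over lst
theorem pvStepB_map (d s w : Int) (f : Int → Option Int) (lst : List Int) :
    pvStepB d s w lst (lst.map f)
      = lst.map (fun x => match f x with
          | none => if s ≤ x ∧ x < s + w then some (x - s + d) else none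
          | some v => some v) := by
  induction lst with
  | nil => rfl
  | cons a l ih => simpa [pvStepB] using ih

theorem pvZipGetD (f : Int → Option Int) (l : List Int) :
    ((l.map f).zip l).map (fun p => p.1.getD p.2) = l.map (fun x => (f x).getD x) := by
  induction l with
  | nil => rfl
  | cons a l ih => simpa using ih

-- invariant of B's outer fold: the slot array is the first-match lookup over the parsed prefix
theorem pvFoldB_inv (lst : List Int) (lines : List String) (done : List (Int × Int × Int)) :
    lines.foldl (fun res line =>
        match pvParseLine line with
        | some (d, s, w) => pvStepB d s w lst res
        | none => res) (lst.map (fun x => pvFind x done))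
      = lst.map (fun x => pvFind x (done ++ lines.filterMap pvParseLine)) := by
  induction lines generalizing done with
  | nil => simp
  | cons l rest ih =>
    simp only [List.foldl_cons, List.filterMap_cons]
    cases h : pvParseLine l with
    | none => simpa using ih done
    | some t =>
      obtain ⟨d, s, w⟩ := t
      dsimp only
      rw [pvStepB_map]
      have harg : lst.map (fun x => match pvFind x done with
            | none => if s ≤ x ∧ x < s + w then some (x - s + d) else none
            | some v => some v)
          = lst.map (fun x => pvFind x (done ++ [(d, s, w)])) := by
        apply List.map_congr_left
        intro x _
        rw [pvFind_append]
        cases pvFind x done with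
        | some v => rfl
        | none => simp [pvFind]
      rw [harg]
      simpa using ih (done ++ [(d, s, w)])

theorem convert_alt_eq (lst : List Int) (map : String) :
    convert_alt lst map = lst.map (fun x => (pvFind x ((pvMapLines map).filterMap pvParseLine)).getD x) := by
  unfold convert_alt
  have h0 : (lst.map (fun _ => (none : Option Int))) = lst.map (fun x => pvFind x []) := rfl
  rw [h0, pvFoldB_inv lst (pvMapLines map) []]
  simp only [List.nil_append]
  rw [pvZipGetD]

-- the linear first-match lookup is the head of the filtered table
theorem pvFind_eq_head (x : Int) (rs : List (Int × Int × Int)) :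
    pvFind x rs = ((rs.filter fun t => decide (t.2.1 ≤ x ∧ x < t.2.1 + t.2.2)).head?).map
      (fun t => x - t.2.1 + t.1) := by
  induction rs with
  | nil => rfl
  | cons t rs ih =>
    simp only [pvFind, List.filter_cons]
    by_cases hc : t.2.1 ≤ x ∧ x < t.2.1 + t.2.2
    · simp [hc]
    · simp [hc, ih]

theorem pvMemTake1 {α : Type} {a : α} {l : List α} : a ∈ l.take 1 ↔ l.head? = some a := by
  cases l <;> simp [eq_comm]

theorem pvFoldl_append {α β : Type} (f : α → β) (lst : List α) (acc : List β) :
    lst.foldl (fun r x => r ++ [f x]) acc = acc ++ lst.map f := by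
  induction lst generalizing acc with
  | nil => simp
  | cons x xs ih => simp [List.foldl_cons, ih]

theorem convert_spec : Claim_unchanged_convert := by
  intro lst map _ _ hnd
  unfold convert
  rw [pvFoldl_append, convert_alt_eq]
  simp only [List.nil_append]
  apply List.map_congr_left
  intro x hx
  rw [pvScanA_eq_find, pvFind_eq_head]
  cases h : ((((pvMapLines map).filterMap pvParseLine).filter
      fun t => decide (t.2.1 ≤ x ∧ x < t.2.1 + t.2.2)).head?) with
  | none => simp
  | some t =>
    simp only [Option.map_some, Option.getD_some]
    split_ifs with hv
    · -- the first matching line maps x to 0: by ¬D_ the source x must itself be 0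
      by_contra hxv
      exact hnd ⟨x, hx, fun h0 => hxv (by omega), t, pvMemTake1.mpr h, by omega⟩
    · rfl

theorem convert_changed : Claim_changed_convert := by
  unfold Claim_changed_convert; decide

theorem convert_tight : Claim_exact_convert := by
  intro lst map _ _ hd heq
  obtain ⟨x, hx, hx0, t, htm, h0⟩ := hd
  unfold convert at heq
  rw [pvFoldl_append, convert_alt_eq] at heq
  simp only [List.nil_append] at heq
  have hpt := (List.map_inj_left).mp heq x hx
  rw [pvScanA_eq_find, pvFind_eq_head, pvMemTake1.mp htm] at hpt
  simp only [Option.map_some, Option.getD_some] at hpt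
  rw [if_pos (by omega)] at hpt
  omega
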